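-- pv_equiv track=rewrite | github.com/Symbolk/AlgInPy | stack/1111max-nesting-depth.py | maxDepthAfterSplit2
-- ===== SOURCE A (Python) =====
-- from typing import List
--
-- def maxDepthAfterSplit2(seq: str) -> List[int]:
--     ans = []
--     a = b = 0  # depth
--     for s in seq:
--         if s == '(':
--             if a <= b:
--                 a += 1
--                 ans.append(0)
--             else:
--                 b += 1
--                 ans.append(1)
--         elif s == ')':
--             if a > b:
--                 a -= 1
--                 ans.append(0)
--             else:
--                 b -= 1
--                 ans.append(1)
--     return ans
-- ===== SOURCE B (Python) =====
-- from typing import List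
-- def maxDepthAfterSplit2(seq: str) -> List[int]:
--     ans = []
--     depth = 0
--     for s in seq:
--         if s == '(':
--             depth += 1
--             ans.append((depth + 1) % 2)
--         elif s == ')':
--             ans.append((depth + 1) % 2)
--             depth -= 1
--     return ans
-- ===== Notes on version B (the rewrite author's own statement) =====
-- stated objective: simpler
-- what changed: Replaces A's two load-balancing group counters and their comparison branches with a single depth counter and the parity formula (depth+1) % 2.
import Mathlib
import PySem

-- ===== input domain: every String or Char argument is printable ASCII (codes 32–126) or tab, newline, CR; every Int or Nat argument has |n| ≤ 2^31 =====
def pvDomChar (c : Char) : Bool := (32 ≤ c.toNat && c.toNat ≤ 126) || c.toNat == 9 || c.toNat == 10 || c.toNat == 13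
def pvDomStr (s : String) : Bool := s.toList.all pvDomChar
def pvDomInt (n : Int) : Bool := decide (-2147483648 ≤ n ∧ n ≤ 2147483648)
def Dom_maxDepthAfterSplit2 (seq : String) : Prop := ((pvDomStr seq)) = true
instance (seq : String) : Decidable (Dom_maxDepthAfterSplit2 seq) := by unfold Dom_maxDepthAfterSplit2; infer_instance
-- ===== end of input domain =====

-- B replaces A's two load-balancing group counters with one depth counter and a parity formula; objective: simpler.

-- ===== PORT A =====
-- A: two counters a, b (current depth assigned to group 0 / group 1); '(' goes to the
-- shallower group, ')' is taken from the deeper group.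
def maxDepthAfterSplit2 (seq : String) : List Int :=
  (seq.toList.foldl (fun (st : List Int × Int × Int) s =>
      let ans := st.1
      let a := st.2.1
      let b := st.2.2
      if s = '(' then
        if a ≤ b then (ans ++ [0], a + 1, b) else (ans ++ [1], a, b + 1)
      else if s = ')' then
        if a > b then (ans ++ [0], a - 1, b) else (ans ++ [1], a, b - 1)
      else st)
    ([], 0, 0)).1

-- ===== PORT B =====
-- B: one depth counter; group = (depth + 1) % 2 (Python %, ported as PySem.Int.mod).
def maxDepthAfterSplit2_alt (seq : String) : List Int :=
  (seq.toList.foldl (fun (st : List Int × Int) s =>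
      let ans := st.1
      let depth := st.2
      if s = '(' then
        (ans ++ [PySem.Int.mod (depth + 1 + 1) 2], depth + 1)
      else if s = ')' then
        (ans ++ [PySem.Int.mod (depth + 1) 2], depth - 1)
      else st)
    ([], 0)).1

-- ===== PRECONDITION & SPEC =====
def Spec_maxDepthAfterSplit2 (seq : String) (out : List Int) : Prop := out = maxDepthAfterSplit2_alt seq
instance (seq : String) (out : List Int) : Decidable (Spec_maxDepthAfterSplit2 seq out) := by unfold Spec_maxDepthAfterSplit2; infer_instance

-- ===== CLAIM (what is proved, stated in full; the proofs are below) =====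
def Claim_equal_maxDepthAfterSplit2 : Prop := ∀ (seq : String), Dom_maxDepthAfterSplit2 seq → Spec_maxDepthAfterSplit2 seq (maxDepthAfterSplit2 seq)

-- ===== LEMMAS AND PROOFS =====

-- Invariant linking A's state (a, b) to B's depth: a + b = depth and a - b = depth % 2.
theorem pv_fold_eq (l : List Char) (ans : List Int) (a b depth : Int)
    (hsum : a + b = depth) (hpar : a - b = PySem.Int.mod depth 2) :
    (l.foldl (fun (st : List Int × Int × Int) s =>
      let ans := st.1
      let a := st.2.1
      let b := st.2.2
      if s = '(' then
        if a ≤ b then (ans ++ [0], a + 1, b) else (ans ++ [1], a, b + 1)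
      else if s = ')' then
        if a > b then (ans ++ [0], a - 1, b) else (ans ++ [1], a, b - 1)
      else st) (ans, a, b)).1
    = (l.foldl (fun (st : List Int × Int) s =>
      let ans := st.1
      let depth := st.2
      if s = '(' then
        (ans ++ [PySem.Int.mod (depth + 1 + 1) 2], depth + 1)
      else if s = ')' then
        (ans ++ [PySem.Int.mod (depth + 1) 2], depth - 1)
      else st) (ans, depth)).1 := by
  induction l generalizing ans a b depth with
  | nil => simp
  | cons s l ih =>
    rw [PySem.Int.mod_eq_emod_of_pos (by norm_num : (0:Int) < 2)] at hpar
    simp only [List.foldl_cons]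
    by_cases h1 : s = '('
    · simp only [if_pos h1]
      by_cases hab : a ≤ b
      · rw [if_pos hab]
        have hv : PySem.Int.mod (depth + 1 + 1) 2 = 0 := by
          rw [PySem.Int.mod_eq_emod_of_pos (by norm_num)]; omega
        rw [hv]
        exact ih _ _ _ _ (by omega)
          (by rw [PySem.Int.mod_eq_emod_of_pos (by norm_num : (0:Int) < 2)]; omega)
      · rw [if_neg hab]
        have hv : PySem.Int.mod (depth + 1 + 1) 2 = 1 := by
          rw [PySem.Int.mod_eq_emod_of_pos (by norm_num)]; omega
        rw [hv]
        exact ih _ _ _ _ (by omega)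
          (by rw [PySem.Int.mod_eq_emod_of_pos (by norm_num : (0:Int) < 2)]; omega)
    · by_cases h2 : s = ')'
      · simp only [if_neg h1, if_pos h2]
        by_cases hab : a > b
        · rw [if_pos hab]
          have hv : PySem.Int.mod (depth + 1) 2 = 0 := by
            rw [PySem.Int.mod_eq_emod_of_pos (by norm_num)]; omega
          rw [hv]
          exact ih _ _ _ _ (by omega)
            (by rw [PySem.Int.mod_eq_emod_of_pos (by norm_num : (0:Int) < 2)]; omega)
        · rw [if_neg hab]
          have hv : PySem.Int.mod (depth + 1) 2 = 1 := by
            rw [PySem.Int.mod_eq_emod_of_pos (by norm_num)]; omega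
          rw [hv]
          exact ih _ _ _ _ (by omega)
            (by rw [PySem.Int.mod_eq_emod_of_pos (by norm_num : (0:Int) < 2)]; omega)
      · simp only [if_neg h1, if_neg h2]
        exact ih _ _ _ _ hsum (by rw [PySem.Int.mod_eq_emod_of_pos (by norm_num : (0:Int) < 2)]; exact hpar)

-- ===== VERDICT (by name: the statement is the Claim_ definition above) =====
theorem maxDepthAfterSplit2_spec : Claim_equal_maxDepthAfterSplit2 := by
  intro seq _
  unfold Spec_maxDepthAfterSplit2 maxDepthAfterSplit2 maxDepthAfterSplit2_alt
  exact pv_fold_eq seq.toList [] 0 0 0 (by ring)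
    (by rw [PySem.Int.mod_eq_emod_of_pos (by norm_num : (0:Int) < 2)]; decide)
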